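-- pv_equiv track=rewrite | github.com/heinzyao/threads-scraper | main.py | _apply_exclude
-- ===== SOURCE A (Python) =====
-- def _apply_exclude(posts: list[dict], exclude: list[str]) -> list[dict]:
--     """過濾掉內容含任一排除詞的貼文（case-insensitive）。"""
--     if not exclude:
--         return posts
--     lower_excludes = [kw.lower() for kw in exclude]
--     return [
--         p for p in posts
--         if not any(ex in p.get("content", "").lower() for ex in lower_excludes)
--     ]
-- ===== SOURCE B (Python) =====
-- def _apply_exclude(posts: list[dict], exclude: list[str]) -> list[dict]:
--     """Filter posts whose content contains any excluded keyword (case-insensitive).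
--
--     Different algorithm: instead of testing every keyword against every post
--     (post-outer, keyword-inner), B pre-pairs each post with its lowercased
--     content ONCE, then runs one FILTERING PASS PER KEYWORD over the shrinking
--     list of survivors (keyword-outer, staged sieve), and finally projects the
--     posts back out. Correct because surviving all per-keyword sieves is the
--     same as containing no keyword."""
--     remaining = [(p, p.get("content", "").lower()) for p in posts]
--     for kw in exclude:
--         k = kw.lower()
--         remaining = [(p, c) for (p, c) in remaining if k not in c]
--     return [p for (p, c) in remaining]
-- ===== Notes on version B (the rewrite author's own statement) =====
-- stated objective: alternative
-- what changed: B inverts the loop nesting: it caches each post's lowercased content once, then applies one filtering sieve per keyword over the shrinking survivor list (keyword-outer staged passes), instead of A's per-post scan over all keywords with content re-lowered for each keyword.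
import Mathlib
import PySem

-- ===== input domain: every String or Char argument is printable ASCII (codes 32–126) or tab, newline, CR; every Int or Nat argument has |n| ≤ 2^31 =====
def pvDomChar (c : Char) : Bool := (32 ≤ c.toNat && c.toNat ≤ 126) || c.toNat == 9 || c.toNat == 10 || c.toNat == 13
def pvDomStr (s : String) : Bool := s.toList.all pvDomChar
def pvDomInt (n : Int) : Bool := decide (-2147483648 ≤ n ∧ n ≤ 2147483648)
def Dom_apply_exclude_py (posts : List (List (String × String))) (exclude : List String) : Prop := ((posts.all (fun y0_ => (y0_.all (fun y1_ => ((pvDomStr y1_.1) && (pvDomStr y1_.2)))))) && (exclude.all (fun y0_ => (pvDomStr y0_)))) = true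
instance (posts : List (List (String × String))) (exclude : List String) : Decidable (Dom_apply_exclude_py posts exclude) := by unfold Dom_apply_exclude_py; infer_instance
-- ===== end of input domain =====

-- B caches each post's lowercased content once and filters the survivor list with one sieve pass
-- per keyword (keyword-outer) instead of A's per-post any-keyword scan; alternative, same results.
-- ===== PORT A =====
def apply_exclude_py (posts : List (List (String × String))) (exclude : List String) : List (List (String × String)) :=
  if exclude.isEmpty then posts
  else
    let lower_excludes := exclude.map PySem.Str.lower
    posts.filter (fun p =>
      ! lower_excludes.any (fun ex =>
          PySem.Str.isIn ex (PySem.Str.lower ((PySem.Dict.mk p).getD "content" ""))))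

-- ===== PORT B =====
def apply_exclude_py_alt (posts : List (List (String × String))) (exclude : List String) : List (List (String × String)) :=
  let remaining := posts.map (fun p => (p, PySem.Str.lower ((PySem.Dict.mk p).getD "content" "")))
  let final := exclude.foldl (fun rem kw =>
      let k := PySem.Str.lower kw
      rem.filter (fun pc => ! PySem.Str.isIn k pc.2)) remaining
  final.map (fun pc => pc.1)

-- ===== PRECONDITION & SPEC =====
def Spec_apply_exclude_py (posts : List (List (String × String))) (exclude : List String) (out : List (List (String × String))) : Prop := out = apply_exclude_py_alt posts exclude
instance (posts : List (List (String × String))) (exclude : List String) (out : List (List (String × String))) : Decidable (Spec_apply_exclude_py posts exclude out) := by unfold Spec_apply_exclude_py; infer_instance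

-- ===== CLAIM =====
def Claim_equal_apply_exclude_py : Prop := ∀ (posts : List (List (String × String))) (exclude : List String), Dom_apply_exclude_py posts exclude → Spec_apply_exclude_py posts exclude (apply_exclude_py posts exclude)

-- ===== LEMMAS AND PROOFS =====

-- B's keyword-outer fold of sieves = one filter by "no keyword occurs".
lemma pvFoldl_sieve {α : Type} (kws : List String) (ys : List (α × String)) :
    kws.foldl (fun rem kw =>
        let k := PySem.Str.lower kw
        rem.filter (fun pc => ! PySem.Str.isIn k pc.2)) ys
      = ys.filter (fun pc => kws.all (fun kw => ! PySem.Str.isIn (PySem.Str.lower kw) pc.2)) := by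
  induction kws generalizing ys with
  | nil => simp
  | cons k rest ih =>
    simp only [List.foldl_cons, ih, List.filter_filter, List.all_cons]
    congr 1
    funext pc
    rw [Bool.and_comm]

-- ===== VERDICT =====
theorem apply_exclude_py_spec : Claim_equal_apply_exclude_py := by
  intro posts exclude _
  unfold Spec_apply_exclude_py apply_exclude_py apply_exclude_py_alt
  simp only [pvFoldl_sieve]
  by_cases h : exclude.isEmpty
  · simp [List.isEmpty_iff.mp h, Function.comp_def]
  · simp only [h, List.filter_map, List.map_map, Function.comp_def,
               List.all_eq_not_any_not, Bool.not_not, List.any_map]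
    simp
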